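-- pv_equiv track=rewrite | github.com/open-quantum-safe/liboqs | scripts/doxyfy.py | anchorstring
-- ===== SOURCE A (Python) =====
-- def anchorstring(str):
--     doxyref=str.replace("/", "")
--     # can't simply use lower() as github-markdown retains non-leading uppercase characters
--     # so lowercase only every char after a space:
--     drwords = doxyref.split(" ")
--     doxyref = ""
--     i = 0
--     while i < len(drwords):
--         if len(drwords[i]) != 0:
--             doxyref = doxyref+drwords[i][0].lower() + drwords[i][1:]
--         if i < len(drwords)-1:
--            doxyref=doxyref+"-"
--         i=i+1
--     return doxyref
-- ===== SOURCE B (Python) =====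
-- def anchorstring(str):
--     # single left-to-right scan instead of replace/split/index-loop
--     out = []
--     at_word_start = True
--     for c in str:
--         if c == '/':
--             continue
--         if c == ' ':
--             out.append('-')
--             at_word_start = True
--         else:
--             out.append(c.lower() if at_word_start else c)
--             at_word_start = False
--     return "".join(out)
-- ===== Notes on version B (the rewrite author's own statement) =====
-- stated objective: faster
-- what changed: Replaces the replace-then-split-then-index-while-loop (with repeated string concatenation) by a single left-to-right character scan with an at_word_start flag, joining a char list once.
import Mathlib
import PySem

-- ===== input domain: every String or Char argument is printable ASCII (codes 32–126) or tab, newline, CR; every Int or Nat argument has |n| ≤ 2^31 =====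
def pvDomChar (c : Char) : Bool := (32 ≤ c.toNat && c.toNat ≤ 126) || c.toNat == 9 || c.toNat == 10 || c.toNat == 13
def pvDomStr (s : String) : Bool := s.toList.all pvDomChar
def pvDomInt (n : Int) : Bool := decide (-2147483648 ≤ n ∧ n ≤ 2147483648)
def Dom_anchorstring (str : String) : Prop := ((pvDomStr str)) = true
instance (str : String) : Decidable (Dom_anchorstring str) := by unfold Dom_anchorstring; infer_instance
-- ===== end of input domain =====

-- B replaces A's replace/split/while-index pipeline by a single character scan with a word-start flag (objective: faster, one pass, no word list).

-- ===== PORT A =====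
-- drwords[i][0].lower() + drwords[i][1:]
def pvLcfirst : List Char → List Char
  | [] => []
  | c :: t => PySem.Chars.lowerChar c :: t

-- the while loop: body for word i, "-" appended whenever i < len(drwords)-1 (i.e. not the last word)
def pvAWhile : List (List Char) → List Char → List Char
  | [], doxyref => doxyref
  | [w], doxyref => if w.length ≠ 0 then doxyref ++ pvLcfirst w else doxyref
  | w :: ws, doxyref =>
      pvAWhile ws ((if w.length ≠ 0 then doxyref ++ pvLcfirst w else doxyref) ++ ['-'])

def anchorstring (str : String) : String :=
  let doxyref := PySem.Str.replace str "/" ""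
  let drwords := PySem.Chars.splitOn doxyref.toList [' ']
  String.ofList (pvAWhile drwords [])

-- ===== PORT B =====
def pvBStep : (List Char × Bool) → Char → (List Char × Bool)
  | (out, atWordStart), c =>
    if c = '/' then (out, atWordStart)
    else if c = ' ' then (out ++ ['-'], true)
    else (out ++ [if atWordStart then PySem.Chars.lowerChar c else c], false)

def anchorstring_alt (str : String) : String :=
  String.ofList (str.toList.foldl pvBStep ([], true)).1

-- ===== PRECONDITION & SPEC =====
def Spec_anchorstring (str : String) (out : String) : Prop := out = anchorstring_alt str
instance (str : String) (out : String) : Decidable (Spec_anchorstring str out) := by unfold Spec_anchorstring; infer_instance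

-- ===== CLAIM (what is proved, stated in full; the proofs are below) =====
def Claim_equal_anchorstring : Prop := ∀ (str : String), Dom_anchorstring str → Spec_anchorstring str (anchorstring str)

-- ===== LEMMAS AND PROOFS =====

-- direct recursive split on ' ' (proof-side characterisation of PySem.Chars.splitOn.go)
def pvSpSplit : List Char → List Char → List (List Char)
  | pre, [] => [pre]
  | pre, c :: t => if c = ' ' then pre :: pvSpSplit [] t else pvSpSplit (pre ++ [c]) t

-- proof-side one-pass spec: what B computes, as a structural recursion
def pvScan : List Char → Bool → List Char
  | [], _ => []
  | c :: t, flag =>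
    if c = '/' then pvScan t flag
    else if c = ' ' then '-' :: pvScan t true
    else (if flag then PySem.Chars.lowerChar c else c) :: pvScan t false

theorem pvReplaceGo (fuel : Nat) (l acc : List Char) (h : l.length ≤ fuel) :
    PySem.Chars.replace.go ['/'] [] fuel l acc
      = acc.reverse ++ l.filter (fun c => !(c == '/')) := by
  induction fuel generalizing l acc with
  | zero =>
    have : l = [] := List.length_eq_zero_iff.mp (Nat.le_zero.mp h)
    subst this; simp [PySem.Chars.replace.go]
  | succ n ih =>
    cases l with
    | nil => simp [PySem.Chars.replace.go]
    | cons c t =>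
      simp only [PySem.Chars.replace.go, List.isPrefixOf, List.length_cons,
        List.length_nil, List.drop_succ_cons, List.drop_zero, List.reverse_nil,
        List.nil_append, Bool.and_true]
      have hlt : t.length ≤ n := by simpa using Nat.le_of_succ_le_succ (by simpa using h)
      by_cases hc : c = '/'
      · subst hc
        rw [if_pos (by simp), ih t acc hlt]
        simp
      · rw [if_neg (by simp [Ne.symm hc]), ih t (c :: acc) hlt]
        simp [hc]

theorem pvReplaceEq (l : List Char) :
    PySem.Chars.replace l ['/'] [] = l.filter (fun c => !(c == '/')) := by
  simp only [PySem.Chars.replace, List.isEmpty_cons, if_false, Bool.false_eq_true]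
  simpa using pvReplaceGo l.length l [] le_rfl

theorem pvSplitGo (fuel : Nat) (l cur : List Char) (accs : List (List Char))
    (h : l.length ≤ fuel) :
    PySem.Chars.splitOn.go [' '] fuel l cur accs = accs.reverse ++ pvSpSplit cur.reverse l := by
  induction fuel generalizing l cur accs with
  | zero =>
    have : l = [] := List.length_eq_zero_iff.mp (Nat.le_zero.mp h)
    subst this; simp [PySem.Chars.splitOn.go, pvSpSplit]
  | succ n ih =>
    cases l with
    | nil => simp [PySem.Chars.splitOn.go, pvSpSplit]
    | cons c t =>
      simp only [PySem.Chars.splitOn.go, List.isPrefixOf, List.length_cons,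
        List.length_nil, List.drop_succ_cons, List.drop_zero, Bool.and_true]
      have hlt : t.length ≤ n := by simpa using Nat.le_of_succ_le_succ (by simpa using h)
      by_cases hc : c = ' '
      · subst hc
        rw [if_pos (by simp), ih t [] (cur.reverse :: accs) hlt]
        simp [pvSpSplit]
      · rw [if_neg (by simp [Ne.symm hc]), ih t (c :: cur) accs hlt]
        simp [pvSpSplit, hc]

theorem pvSplitEq (l : List Char) :
    PySem.Chars.splitOn l [' '] = pvSpSplit [] l := by
  simpa using pvSplitGo (l.length + 1) l [] [] (Nat.le_succ _)

theorem pvSpSplit_ne_nil (pre l : List Char) : pvSpSplit pre l ≠ [] := by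
  induction l generalizing pre with
  | nil => simp [pvSpSplit]
  | cons c t ih =>
    simp only [pvSpSplit]
    split_ifs <;> simp [ih]

-- scanning ignores '/' exactly as filtering does
theorem pvScan_filter (l : List Char) (flag : Bool) :
    pvScan (l.filter (fun c => !(c == '/'))) flag = pvScan l flag := by
  induction l generalizing flag with
  | nil => rfl
  | cons c t ih =>
    by_cases hc : c = '/'
    · subst hc; simp [pvScan, ih]
    · simp [hc, pvScan, ih]

-- the while loop over the split words equals the scan, for '/'-free input
theorem pvAWhile_scan (l pre : List Char) (acc : List Char) (hl : '/' ∉ l) (hp : '/' ∉ pre) :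
    pvAWhile (pvSpSplit pre l) acc = acc ++ pvLcfirst pre ++ pvScan l (pre = []) := by
  induction l generalizing pre acc with
  | nil =>
    cases pre with
    | nil => simp [pvSpSplit, pvAWhile, pvLcfirst, pvScan]
    | cons d p => simp [pvSpSplit, pvAWhile, pvLcfirst, pvScan]
  | cons c t ih =>
    have hct : '/' ∉ t := fun h => hl (List.mem_cons_of_mem _ h)
    have hcc : c ≠ '/' := fun h => hl (h ▸ List.mem_cons_self)
    by_cases hc : c = ' '
    · subst hc
      simp only [pvSpSplit, if_true]
      obtain ⟨w, ws, hw⟩ : ∃ w ws, pvSpSplit ([] : List Char) t = w :: ws := by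
        cases hsp : pvSpSplit ([] : List Char) t with
        | nil => exact absurd hsp (pvSpSplit_ne_nil _ _)
        | cons w ws => exact ⟨w, ws, rfl⟩
      have step : pvAWhile (pre :: w :: ws) acc
          = pvAWhile (w :: ws) ((if pre.length ≠ 0 then acc ++ pvLcfirst pre else acc) ++ ['-']) := rfl
      rw [hw, step, ← hw, ih [] _ hct (by simp)]
      cases pre with
      | nil => simp [pvLcfirst, pvScan]
      | cons d p => simp [pvLcfirst, pvScan]
    · simp only [pvSpSplit, hc, if_false]
      rw [ih (pre ++ [c]) acc hct (by simp [hp, Ne.symm hcc])]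
      cases pre with
      | nil => simp [pvLcfirst, pvScan, hc, hcc]
      | cons d p => simp [pvLcfirst, pvScan, hc, hcc]

-- B's fold computes the scan
theorem pvFold_scan (l : List Char) (acc : List Char) (flag : Bool) :
    (l.foldl pvBStep (acc, flag)).1 = acc ++ pvScan l flag := by
  induction l generalizing acc flag with
  | nil => simp [pvScan]
  | cons c t ih =>
    by_cases h1 : c = '/'
    · subst h1; simp [pvBStep, pvScan, ih]
    · by_cases h2 : c = ' '
      · subst h2; simp [pvBStep, pvScan, h1, ih]
      · simp [pvBStep, pvScan, h1, h2, ih]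

-- ===== VERDICT (by name: the statement is the Claim_ definition above) =====
theorem anchorstring_spec : Claim_equal_anchorstring := by
  intro s _
  show anchorstring s = anchorstring_alt s
  have hrep : (PySem.Str.replace s "/" "").toList
      = s.toList.filter (fun c => !(c == '/')) := by
    simp [PySem.Str.replace, pvReplaceEq]
  calc anchorstring s
      = String.ofList
          (pvAWhile (PySem.Chars.splitOn (PySem.Str.replace s "/" "").toList [' ']) []) := rfl
    _ = anchorstring_alt s := by
        rw [hrep, pvSplitEq,
          pvAWhile_scan (s.toList.filter (fun c => !(c == '/'))) [] []
            (by simp) (by simp),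
          pvScan_filter]
        show _ = String.ofList (List.foldl pvBStep ([], true) s.toList).1
        rw [pvFold_scan]
        simp [pvLcfirst]
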